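-- pv_equiv track=rewrite | github.com/melinnediniz/RNA-AA3 | utilities/neuron_architectures.py | get_architectures
-- ===== SOURCE A (Python) =====
-- def get_architectures(Nh, quant):
--     S = [i for i in range(int(Nh))]
--     arch_list = []
--     for i in range(len(S)):
--         for j in range(len(S)):
--             if ((S[i], S[j]) not in arch_list) and (i + j == len(S) and (len(arch_list) < quant)):
--                 arch_list.append((S[i], S[j]))
--
--     return arch_list
-- ===== SOURCE B (Python) =====
-- def get_architectures(Nh, quant):
--     pairs = [(i, Nh - i) for i in range(1, int(Nh))]
--     k = min(max(quant, 0), len(pairs))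
--     return pairs[:k]
-- ===== Notes on version B (the rewrite author's own statement) =====
-- stated objective: faster
-- what changed: Replaces A's nested scan over all (i,j) index pairs with a linear membership test inside by directly emitting the pairs (i, Nh-i) for i = 1..Nh-1 and truncating the list to quant.
import Mathlib
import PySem

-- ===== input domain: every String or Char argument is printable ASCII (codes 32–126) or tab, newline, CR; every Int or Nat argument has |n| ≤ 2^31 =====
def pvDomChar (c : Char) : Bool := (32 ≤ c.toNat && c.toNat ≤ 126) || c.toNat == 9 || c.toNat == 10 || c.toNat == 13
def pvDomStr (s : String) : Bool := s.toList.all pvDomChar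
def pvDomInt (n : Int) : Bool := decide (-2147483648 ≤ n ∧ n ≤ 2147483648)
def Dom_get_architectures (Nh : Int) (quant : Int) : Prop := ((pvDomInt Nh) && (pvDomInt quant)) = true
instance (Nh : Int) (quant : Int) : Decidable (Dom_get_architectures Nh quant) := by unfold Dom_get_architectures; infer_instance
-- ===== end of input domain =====

-- B replaces A's quadratic index scan (with a linear membership test inside) by directly
-- emitting the pairs (i, Nh-i) for i = 1..Nh-1 and truncating to quant (objective: faster).

-- ===== PORT A =====
def get_architectures (Nh : Int) (quant : Int) : List (Int × Int) :=
  let S : List Int := PySem.List.pyRange 0 Nh 1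
  (List.range S.length).foldl
    (fun arch i =>
      (List.range S.length).foldl
        (fun arch j =>
          if (PySem.List.pyGetD S (Int.ofNat i) 0, PySem.List.pyGetD S (Int.ofNat j) 0) ∉ arch ∧
             (i + j = S.length ∧ (arch.length : Int) < quant)
          then arch ++ [(PySem.List.pyGetD S (Int.ofNat i) 0, PySem.List.pyGetD S (Int.ofNat j) 0)]
          else arch)
        arch)
    []

-- ===== PORT B =====
def get_architectures_alt (Nh : Int) (quant : Int) : List (Int × Int) :=
  let pairs := (PySem.List.pyRange 1 Nh 1).map (fun i => (i, Nh - i))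
  let k := min (max quant 0) ((pairs.length : Int))
  pairs.take k.toNat

-- ===== PRECONDITION & SPEC =====
def Spec_get_architectures (Nh : Int) (quant : Int) (out : List (Int × Int)) : Prop := out = get_architectures_alt Nh quant
instance (Nh : Int) (quant : Int) (out : List (Int × Int)) : Decidable (Spec_get_architectures Nh quant out) := by unfold Spec_get_architectures; infer_instance

-- ===== CLAIM (what is proved, stated in full; the proofs are below) =====
def Claim_equal_get_architectures : Prop := ∀ (Nh : Int) (quant : Int), Dom_get_architectures Nh quant → Spec_get_architectures Nh quant (get_architectures Nh quant)

-- ===== LEMMAS AND PROOFS =====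

-- A's inner-loop body, with S[i]/S[j] already evaluated (i, j index range(n)).
def pvF (n : Nat) (quant : Int) (i : Nat) : List (Int × Int) → Nat → List (Int × Int) :=
  fun arch j =>
    if (Int.ofNat i, Int.ofNat j) ∉ arch ∧ (i + j = n ∧ (arch.length : Int) < quant)
    then arch ++ [(Int.ofNat i, Int.ofNat j)] else arch

-- The net effect of A's inner loop for a given i: append (i, n-i) if absent and below quant.
def pvG (n : Nat) (quant : Int) (i : Nat) (arch : List (Int × Int)) : List (Int × Int) :=
  if ((i : Int), (n : Int) - (i : Int)) ∉ arch ∧ (arch.length : Int) < quant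
  then arch ++ [((i : Int), (n : Int) - (i : Int))] else arch

lemma pvG_idem (n : Nat) (quant : Int) (i : Nat) (arch : List (Int × Int)) :
    pvG n quant i (pvG n quant i arch) = pvG n quant i arch := by
  unfold pvG
  by_cases h : ((i : Int), (n : Int) - (i : Int)) ∉ arch ∧ (arch.length : Int) < quant
  · rw [if_pos h, if_neg]
    intro hc
    exact hc.1 (by simp)
  · rw [if_neg h, if_neg h]

lemma pv_inner (n : Nat) (quant : Int) (i : Nat) (l : List Nat) (arch : List (Int × Int)) :
    l.foldl (pvF n quant i) arch = if ∃ j ∈ l, i + j = n then pvG n quant i arch else arch := by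
  induction l generalizing arch with
  | nil => simp
  | cons j l ih =>
    by_cases hj : i + j = n
    · have hji : (Int.ofNat j) = (n : Int) - (i : Int) := by rw [Int.ofNat_eq_natCast]; omega
      have hstep : pvF n quant i arch j = pvG n quant i arch := by
        unfold pvF pvG
        rw [hji]
        simp [hj]
      have hcons : ∃ x ∈ j :: l, i + x = n := ⟨j, by simp, hj⟩
      rw [List.foldl_cons, hstep, ih, pvG_idem, ite_self, if_pos hcons]
    · have hstep : pvF n quant i arch j = arch := by
        unfold pvF
        rw [if_neg]
        tauto
      have hiff : (∃ x ∈ j :: l, i + x = n) ↔ (∃ x ∈ l, i + x = n) := by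
        simp [hj]
      rw [List.foldl_cons, hstep, ih]
      by_cases h : ∃ x ∈ l, i + x = n
      · rw [if_pos h, if_pos (hiff.mpr h)]
      · rw [if_neg h, if_neg (fun hc => h (hiff.mp hc))]

lemma pv_step (n : Nat) (quant : Int) (i : Nat) (hin : i < n) (arch : List (Int × Int)) :
    (List.range n).foldl (pvF n quant i) arch = if 1 ≤ i then pvG n quant i arch else arch := by
  rw [pv_inner]
  by_cases h : ∃ j ∈ List.range n, i + j = n
  · obtain ⟨j, hj, hij⟩ := h
    have hj' := List.mem_range.mp hj
    rw [if_pos ⟨j, hj, hij⟩, if_pos (by omega)]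
  · rw [if_neg h, if_neg]
    intro hi
    exact h ⟨n - i, List.mem_range.mpr (by omega), by omega⟩

def pvPair (n t : Nat) : Int × Int := ((t : Int), (n : Int) - (t : Int))

lemma pvPair_notmem (n m : Nat) (q : Nat) (hm : 1 ≤ m) :
    pvPair n m ∉ (((List.range' 1 (m - 1)).map (pvPair n)).take q) := by
  intro hmem
  obtain ⟨t, ht, hte⟩ := List.mem_map.mp (List.mem_of_mem_take hmem)
  obtain ⟨c, hc, hc'⟩ := List.mem_range'.mp ht
  have h1 := congrArg Prod.fst hte
  simp only [pvPair] at h1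
  have : t = m := by exact_mod_cast h1
  omega

lemma pv_outer (n : Nat) (quant : Int) (m : Nat) (hm : m ≤ n) :
    (List.range m).foldl (fun arch i => (List.range n).foldl (pvF n quant i) arch) [] =
      ((List.range' 1 (m - 1)).map (pvPair n)).take quant.toNat := by
  induction m with
  | zero => simp
  | succ m ih =>
    rw [List.range_succ, List.foldl_append, ih (by omega), List.foldl_cons, List.foldl_nil,
        pv_step n quant m (by omega)]
    by_cases hm1 : 1 ≤ m
    · rw [if_pos hm1]
      set L := (List.range' 1 (m - 1)).map (pvPair n) with hL
      have hlen : L.length = m - 1 := by simp [hL]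
      have hnot : pvPair n m ∉ L.take quant.toNat := pvPair_notmem n m _ hm1
      have hconcat : (List.range' 1 ((m + 1) - 1)).map (pvPair n) = L ++ [pvPair n m] := by
        have he : (m + 1) - 1 = (m - 1) + 1 := by omega
        rw [he, List.range'_concat, List.map_append, hL]
        have : 1 + 1 * (m - 1) = m := by omega
        rw [this]
        simp
      rw [hconcat]
      by_cases hq : m - 1 < quant.toNat
      · have htake : L.take quant.toNat = L := List.take_of_length_le (by omega)
        have hcond : ((L.take quant.toNat).length : Int) < quant := by
          rw [htake, hlen]; omega
        unfold pvG
        rw [if_pos ⟨by simpa [pvPair] using hnot, hcond⟩, htake,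
            List.take_of_length_le (by simp [hlen]; omega)]
        simp [pvPair]
      · have hcond : ¬ ((L.take quant.toNat).length : Int) < quant := by
          simp only [List.length_take, hlen]
          omega
        unfold pvG
        rw [if_neg (by tauto), List.take_append_of_le_length (by omega)]
    · rw [if_neg hm1]
      have hm0 : m = 0 := by omega
      subst hm0
      simp

lemma pv_portA (Nh quant : Int) :
    get_architectures Nh quant =
      ((List.range' 1 (Nh.toNat - 1)).map (pvPair Nh.toNat)).take quant.toNat := by
  have hlen : (PySem.List.pyRange 0 Nh 1).length = Nh.toNat := by
    rw [PySem.List.length_pyRange_one]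
    congr 1
    omega
  have hget : ∀ (k : Nat), k < Nh.toNat →
      PySem.List.pyGetD (PySem.List.pyRange 0 Nh 1) (Int.ofNat k) 0 = Int.ofNat k := by
    intro k hk
    rw [PySem.List.pyGetD_eq_getElem _ _ (by rw [Int.ofNat_eq_natCast]; omega) (by rw [hlen, Int.ofNat_eq_natCast]; omega)]
    rw [PySem.List.getElem_pyRange_one 0 Nh ((Int.ofNat k).toNat) (by rw [hlen]; simpa using hk)]
    simp
  have hcong : (List.range Nh.toNat).foldl
      (fun arch i =>
        (List.range Nh.toNat).foldl
          (fun arch j =>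
            if (PySem.List.pyGetD (PySem.List.pyRange 0 Nh 1) (Int.ofNat i) 0,
                 PySem.List.pyGetD (PySem.List.pyRange 0 Nh 1) (Int.ofNat j) 0) ∉ arch ∧
               (i + j = Nh.toNat ∧ (arch.length : Int) < quant)
            then arch ++ [(PySem.List.pyGetD (PySem.List.pyRange 0 Nh 1) (Int.ofNat i) 0,
                 PySem.List.pyGetD (PySem.List.pyRange 0 Nh 1) (Int.ofNat j) 0)]
            else arch)
          arch)
      [] =
      (List.range Nh.toNat).foldl
        (fun arch i => (List.range Nh.toNat).foldl (pvF Nh.toNat quant i) arch) [] := by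
    apply PySem.List.foldl_congr_mem
    intro arch i hi
    apply PySem.List.foldl_congr_mem
    intro arch' j hj
    rw [hget i (List.mem_range.mp hi), hget j (List.mem_range.mp hj)]
    rfl
  simp only [get_architectures]
  rw [hlen, hcong, pv_outer Nh.toNat quant Nh.toNat le_rfl]

lemma pv_portB (Nh quant : Int) :
    get_architectures_alt Nh quant =
      ((List.range' 1 (Nh.toNat - 1)).map (pvPair Nh.toNat)).take quant.toNat := by
  have hlist : (PySem.List.pyRange 1 Nh 1).map (fun i => (i, Nh - i)) =
      (List.range' 1 (Nh.toNat - 1)).map (pvPair Nh.toNat) := by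
    by_cases hpos : 1 ≤ Nh
    · rw [PySem.List.pyRange_one 1 Nh, List.map_map,
          show Nh.toNat - 1 = (Nh - 1).toNat from by omega,
          List.range'_eq_map_range, List.map_map]
      apply List.map_congr_left
      intro k hk
      simp only [Function.comp, pvPair, Prod.mk.injEq]
      refine ⟨by push_cast; omega, by push_cast; omega⟩
    · rw [PySem.List.pyRange_one_eq_nil (by omega),
          show Nh.toNat - 1 = 0 from by omega]
      simp
  simp only [get_architectures_alt]
  rw [hlist]
  set L := (List.range' 1 (Nh.toNat - 1)).map (pvPair Nh.toNat) with hL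
  have hmin : (min (max quant 0) ((L.length : Int))).toNat = min quant.toNat L.length := by
    omega
  rw [hmin, min_comm, ← List.take_take, List.take_of_length_le (by simp)]

-- ===== VERDICT (by name: the statement is the Claim_ definition above) =====
theorem get_architectures_spec : Claim_equal_get_architectures := by
  intro Nh quant _hdom
  unfold Spec_get_architectures
  rw [pv_portA, pv_portB]
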